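-- pv_equiv track=rewrite | github.com/dream-star-end/codeWiki | backend/app/services/module_assign.py | _best_prefix
-- ===== SOURCE A (Python) =====
-- from typing import Dict, List, Tuple
--
-- def _best_prefix(path: str, prefixes: List[str]) -> str:
--     best = ""
--     for prefix in prefixes:
--         if not prefix:
--             continue
--         if path.startswith(prefix) and len(prefix) > len(best):
--             best = prefix
--     return best
-- ===== SOURCE B (Python) =====
-- def _best_prefix(path, prefixes):
--     for prefix in sorted(prefixes, key=len, reverse=True):
--         if prefix and path.startswith(prefix):
--             return prefix
--     return ""
-- ===== Notes on version B (the rewrite author's own statement) =====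
-- stated objective: alternative
-- what changed: Replaces A's best-tracking linear scan with a stable descending sort by length followed by a short-circuiting first-match pass (stability reproduces A's strict-greater tie-break).
import Mathlib
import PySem

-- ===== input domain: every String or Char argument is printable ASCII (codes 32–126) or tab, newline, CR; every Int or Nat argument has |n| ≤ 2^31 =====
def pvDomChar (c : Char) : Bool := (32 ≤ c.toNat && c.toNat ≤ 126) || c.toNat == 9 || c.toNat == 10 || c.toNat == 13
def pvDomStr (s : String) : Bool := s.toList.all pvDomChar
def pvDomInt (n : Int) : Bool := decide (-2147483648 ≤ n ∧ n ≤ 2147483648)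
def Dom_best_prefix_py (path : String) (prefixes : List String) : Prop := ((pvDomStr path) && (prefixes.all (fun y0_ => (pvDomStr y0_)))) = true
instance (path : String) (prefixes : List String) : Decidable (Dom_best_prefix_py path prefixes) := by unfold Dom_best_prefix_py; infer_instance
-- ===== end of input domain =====

-- B replaces A's best-tracking scan by a stable length-descending sort followed by a first-match pass (alternative decomposition, not claimed faster).

-- ===== PORT A =====
def best_prefix_py (path : String) (prefixes : List String) : String :=
  prefixes.foldl
    (fun best pfx =>
      if pfx = "" then best
      else if PySem.Str.startswith path pfx = true ∧ PySem.Str.len best < PySem.Str.len pfx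
        then pfx else best) ""

-- ===== PORT B =====
-- B's loop over the sorted list, returning the first non-empty matching prefix
def bpFirstMatch (path : String) : List String → String
  | [] => ""
  | p :: rest =>
      if p ≠ "" ∧ PySem.Str.startswith path p = true then p else bpFirstMatch path rest

def best_prefix_py_alt (path : String) (prefixes : List String) : String :=
  bpFirstMatch path (PySem.List.sorted prefixes (fun p => PySem.Str.len p) true)

-- ===== PRECONDITION & SPEC =====
def Spec_best_prefix_py (path : String) (prefixes : List String) (out : String) : Prop := out = best_prefix_py_alt path prefixes
instance (path : String) (prefixes : List String) (out : String) : Decidable (Spec_best_prefix_py path prefixes out) := by unfold Spec_best_prefix_py; infer_instance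

-- ===== CLAIM (what is proved, stated in full; the proofs are below) =====
def Claim_equal_best_prefix_py : Prop := ∀ (path : String) (prefixes : List String), Dom_best_prefix_py path prefixes → Spec_best_prefix_py path prefixes (best_prefix_py path prefixes)

-- ===== LEMMAS AND PROOFS =====

theorem len_pos_of_ne_empty (s : String) (h : s ≠ "") : 0 < PySem.Str.len s := by
  simp only [PySem.Str.len_eq]
  have : s.toList ≠ [] := by simpa using h
  have := List.length_pos_of_ne_nil this
  omega

theorem len_empty : PySem.Str.len "" = 0 := rfl

theorem insertBy_nil (f : String → String → Bool) (x : String) :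
    PySem.List.insertBy f x [] = [x] := rfl

theorem insertBy_cons (f : String → String → Bool) (x y : String) (ys : List String) :
    PySem.List.insertBy f x (y :: ys)
      = if f x y then x :: y :: ys else y :: PySem.List.insertBy f x ys := rfl

theorem bpFM_nil (path : String) : bpFirstMatch path [] = "" := rfl

theorem bpFM_cons (path y : String) (ys : List String) :
    bpFirstMatch path (y :: ys)
      = if y ≠ "" ∧ PySem.Str.startswith path y = true then y else bpFirstMatch path ys := rfl

theorem bpFirstMatch_eq_or_mem (path : String) (s : List String) :
    bpFirstMatch path s = "" ∨ bpFirstMatch path s ∈ s := by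
  induction s with
  | nil => exact Or.inl rfl
  | cons y ys ih =>
      rw [bpFM_cons]
      by_cases h : y ≠ "" ∧ PySem.Str.startswith path y = true
      · rw [if_pos h]; exact Or.inr (List.mem_cons_self)
      · rw [if_neg h]
        rcases ih with h' | h'
        · exact Or.inl h'
        · exact Or.inr (List.mem_cons_of_mem _ h')

-- inserting x into a length-descending sorted list and taking the first match
-- equals A's update step applied to the first match of the old list
theorem bpFirstMatch_insertBy (path x : String) (s : List String)
    (hs : s.Pairwise (fun a b => PySem.Str.len b ≤ PySem.Str.len a)) :
    bpFirstMatch path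
      (PySem.List.insertBy (fun a b => decide (PySem.Str.len b < PySem.Str.len a)) x s)
    = if (x ≠ "" ∧ PySem.Str.startswith path x = true) ∧
          PySem.Str.len (bpFirstMatch path s) < PySem.Str.len x
      then x else bpFirstMatch path s := by
  induction s with
  | nil =>
      rw [insertBy_nil, bpFM_cons, bpFM_nil]
      by_cases hq : x ≠ "" ∧ PySem.Str.startswith path x = true
      · rw [if_pos hq, if_pos ⟨hq, by rw [len_empty]; exact len_pos_of_ne_empty x hq.1⟩]
      · rw [if_neg hq, if_neg (fun hc => hq hc.1)]
  | cons y ys ih =>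
      have hpair := List.pairwise_cons.mp hs
      rw [insertBy_cons]
      by_cases hb : PySem.Str.len y < PySem.Str.len x
      · rw [if_pos (decide_eq_true hb), bpFM_cons]
        by_cases hq : x ≠ "" ∧ PySem.Str.startswith path x = true
        · have hlt : PySem.Str.len (bpFirstMatch path (y :: ys)) < PySem.Str.len x := by
            rcases bpFirstMatch_eq_or_mem path (y :: ys) with h' | h'
            · rw [h', len_empty]; exact len_pos_of_ne_empty x hq.1
            · rcases List.mem_cons.mp h' with h'' | h''
              · rw [h'']; exact hb
              · have := hpair.1 _ h''
                omega
          rw [if_pos hq, if_pos ⟨hq, hlt⟩]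
        · rw [if_neg hq, if_neg (fun hc => hq hc.1)]
      · rw [if_neg (fun hc => hb (of_decide_eq_true hc)), bpFM_cons, bpFM_cons]
        by_cases hy : y ≠ "" ∧ PySem.Str.startswith path y = true
        · rw [if_pos hy, if_pos hy, if_neg (fun hc => hb hc.2)]
        · rw [if_neg hy, if_neg hy]
          exact ih hpair.2

-- appending one element to the list to be sorted is one insertion
theorem sorted_append_singleton (l : List String) (x : String) :
    PySem.List.sorted (l ++ [x]) (fun p => PySem.Str.len p) true
      = PySem.List.insertBy (fun a b => decide (PySem.Str.len b < PySem.Str.len a)) x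
          (PySem.List.sorted l (fun p => PySem.Str.len p) true) := by
  rw [PySem.List.sorted_rev_eq_foldl_insertBy, PySem.List.sorted_rev_eq_foldl_insertBy,
    List.foldl_append]
  rfl

-- A's step is the same update as the if-form used above
theorem stepA_eq (path best x : String) :
    (if x = "" then best
     else if PySem.Str.startswith path x = true ∧ PySem.Str.len best < PySem.Str.len x
       then x else best)
    = if (x ≠ "" ∧ PySem.Str.startswith path x = true) ∧
          PySem.Str.len best < PySem.Str.len x
      then x else best := by
  by_cases h0 : x = ""
  · rw [if_pos h0, if_neg (fun hc => hc.1.1 h0)]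
  · rw [if_neg h0]
    by_cases h1 : PySem.Str.startswith path x = true ∧ PySem.Str.len best < PySem.Str.len x
    · rw [if_pos h1, if_pos ⟨⟨h0, h1.1⟩, h1.2⟩]
    · rw [if_neg h1, if_neg (fun hc => h1 ⟨hc.1.2, hc.2⟩)]

theorem alt_eq_a (path : String) (prefixes : List String) :
    best_prefix_py_alt path prefixes = best_prefix_py path prefixes := by
  induction prefixes using List.reverseRecOn with
  | nil => rfl
  | append_singleton l x ih =>
      unfold best_prefix_py_alt at *
      unfold best_prefix_py at *
      rw [sorted_append_singleton, List.foldl_append,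
        bpFirstMatch_insertBy path x _ (PySem.List.sorted_pairwise_rev l _), ih, List.foldl_cons,
        List.foldl_nil, stepA_eq]

-- ===== VERDICT (by name: the statement is the Claim_ definition above) =====
theorem best_prefix_py_spec : Claim_equal_best_prefix_py := by
  intro path prefixes _
  unfold Spec_best_prefix_py
  exact (alt_eq_a path prefixes).symm
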